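-- pv_equiv track=rewrite | github.com/Dheebz/advent-of-code | src/python/year_2024/solution_2024_day_09.py | merge_free
-- ===== SOURCE A (Python) =====
-- from typing import Optional
--
-- Segment = tuple[int, int, Optional[int]]  # (start, length, file_id)
--
-- def merge_free(segments: list[Segment]) -> list[Segment]:
--     """
--     Merge consecutive free segments to maintain compact representation.
--
--     Args:
--         segments: Sorted list of disk segments.
--
--     Returns:
--         List with adjacent free segments merged.
--     """
--     merged: list[Segment] = []
--     for seg in sorted(segments, key=lambda s: s[0]):
--         if (
--             merged
--             and seg[2] is None
--             and merged[-1][2] is None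
--             and merged[-1][0] + merged[-1][1] == seg[0]
--         ):
--             last = merged[-1]
--             merged[-1] = (last[0], last[1] + seg[1], last[2])
--         else:
--             merged.append(seg)
--     return merged
-- ===== SOURCE B (Python) =====
-- def merge_free(segments):
--     """Merge adjacent free segments by divide and conquer: sort by start,
--     recursively merge each half, then join the two halves at their boundary."""
--     return _dc(sorted(segments, key=lambda s: s[0]))
--
--
-- def _dc(segs):
--     if len(segs) <= 1:
--         return list(segs)
--     mid = len(segs) // 2
--     return _join(_dc(segs[:mid]), _dc(segs[mid:]))
--
--
-- def _join(left, right):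
--     if left and right:
--         a = left[-1]
--         b = right[0]
--         if a[2] is None and b[2] is None and a[0] + a[1] == b[0]:
--             return left[:-1] + [(a[0], a[1] + b[1], None)] + right[1:]
--     return left + right
-- ===== Notes on version B (the rewrite author's own statement) =====
-- stated objective: alternative
-- what changed: Replaced A's single left-to-right accumulator pass by a divide-and-conquer recursion: sort, recursively merge each half, and join the two halves with one boundary check; correct because collapsing contiguous free runs is associative at the split boundary.
import Mathlib
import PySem

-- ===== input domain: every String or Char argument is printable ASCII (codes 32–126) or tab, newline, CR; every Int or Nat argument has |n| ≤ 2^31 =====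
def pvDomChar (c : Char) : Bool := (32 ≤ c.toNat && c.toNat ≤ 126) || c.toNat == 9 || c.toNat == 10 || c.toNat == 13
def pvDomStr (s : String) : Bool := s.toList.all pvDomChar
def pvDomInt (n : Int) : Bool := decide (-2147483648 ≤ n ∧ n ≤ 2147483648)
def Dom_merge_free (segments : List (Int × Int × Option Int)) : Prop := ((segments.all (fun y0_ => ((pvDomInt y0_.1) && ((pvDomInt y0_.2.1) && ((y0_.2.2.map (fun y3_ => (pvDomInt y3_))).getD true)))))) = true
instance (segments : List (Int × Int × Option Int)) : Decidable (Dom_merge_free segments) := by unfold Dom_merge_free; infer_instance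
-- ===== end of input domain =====

-- B replaces A's single left-to-right accumulator pass by a divide-and-conquer
-- recursion with a boundary join (objective: alternative decomposition, same cost).

-- ===== PORT A =====
-- one iteration of A's for-loop: merged[-1] update or append
def aStep (merged : List (Int × Int × Option Int)) (seg : Int × Int × Option Int) :
    List (Int × Int × Option Int) :=
  match merged.getLast? with
  | some last =>
    if seg.2.2 = none ∧ last.2.2 = none ∧ last.1 + last.2.1 = seg.1 then
      merged.dropLast ++ [(last.1, last.2.1 + seg.2.1, last.2.2)]
    else merged ++ [seg]
  | none => merged ++ [seg]

def merge_free (segments : List (Int × Int × Option Int)) : List (Int × Int × Option Int) :=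
  (PySem.List.sorted segments (fun s => s.1) false).foldl aStep []

-- ===== PORT B =====
-- Source B's _join: merge the two recursively-merged halves at their boundary
def bJoin (left right : List (Int × Int × Option Int)) : List (Int × Int × Option Int) :=
  match left.getLast?, right with
  | some a, b :: rest =>
    if a.2.2 = none ∧ b.2.2 = none ∧ a.1 + a.2.1 = b.1 then
      left.dropLast ++ (a.1, a.2.1 + b.2.1, none) :: rest
    else left ++ right
  | _, _ => left ++ right

-- Source B's _dc: divide and conquer over the sorted list
def bDC (segs : List (Int × Int × Option Int)) : List (Int × Int × Option Int) :=
  if h : segs.length ≤ 1 then segs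
  else
    bJoin (bDC (segs.take (segs.length / 2))) (bDC (segs.drop (segs.length / 2)))
termination_by segs.length
decreasing_by
  · simpa using Nat.lt_of_lt_of_le (Nat.div_lt_self (by omega) (by omega)) (Nat.le_of_eq (by simp))
  · simp; omega

def merge_free_alt (segments : List (Int × Int × Option Int)) : List (Int × Int × Option Int) :=
  bDC (PySem.List.sorted segments (fun s => s.1) false)

-- ===== PRECONDITION & SPEC =====
def Spec_merge_free (segments : List (Int × Int × Option Int)) (out : List (Int × Int × Option Int)) : Prop := out = merge_free_alt segments
instance (segments : List (Int × Int × Option Int)) (out : List (Int × Int × Option Int)) : Decidable (Spec_merge_free segments out) := by unfold Spec_merge_free; infer_instance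

-- ===== CLAIM (what is proved, stated in full; the proofs are below) =====
def Claim_equal_merge_free : Prop := ∀ (segments : List (Int × Int × Option Int)), Dom_merge_free segments → Spec_merge_free segments (merge_free segments)

-- ===== LEMMAS AND PROOFS =====

theorem bJoin_nil_right (l : List (Int × Int × Option Int)) : bJoin l [] = l := by
  cases h : l.getLast? <;> simp [bJoin]

-- the key local fact: one A-step followed by a join equals joining in two stages
theorem bJoin_aStep (acc : List (Int × Int × Option Int)) (y : Int × Int × Option Int)
    (zs : List (Int × Int × Option Int)) :
    bJoin (aStep acc y) zs = bJoin acc (bJoin [y] zs) := by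
  induction acc using List.reverseRecOn with
  | nil =>
    have h0 : aStep ([] : List (Int × Int × Option Int)) y = [y] := by simp [aStep]
    simp [h0, bJoin]
  | append_singleton acc' a _ =>
    obtain ⟨a1, a2, a3⟩ := a
    obtain ⟨y1, y2, y3⟩ := y
    cases zs with
    | nil =>
      simp only [aStep, bJoin, List.getLast?_concat,
        List.dropLast_concat, List.getLast?_singleton]
      split_ifs <;> simp_all
    | cons b rest =>
      obtain ⟨b1, b2, b3⟩ := b
      simp only [aStep, bJoin, List.getLast?_concat, List.dropLast_concat,
        List.getLast?_singleton, List.dropLast_singleton, List.append_assoc,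
        List.cons_append, List.nil_append]
      split_ifs <;> try (simp_all; done)
      -- three boundary cases: both merges fire, only the first fires, neither fires
      · obtain ⟨hy3, ha3, hay⟩ := ‹y3 = none ∧ a3 = none ∧ a1 + a2 = y1›
        obtain ⟨-, hb3, hyb⟩ := ‹y3 = none ∧ b3 = none ∧ y1 + y2 = b1›
        subst hy3 ha3 hb3
        have h1 : a1 + (a2 + y2) = b1 := by omega
        simp [h1, hay, add_assoc]
      · rename_i hB
        obtain ⟨hy3, ha3, hay⟩ := ‹y3 = none ∧ a3 = none ∧ a1 + a2 = y1›
        subst hy3 ha3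
        have hne : ¬(b3 = none ∧ a1 + (a2 + y2) = b1) := by
          rintro ⟨hb, hsum⟩; exact hB ⟨rfl, hb, by omega⟩
        simp [hay, hne]
      · rename_i hA hB
        have hne : ¬(a3 = none ∧ y3 = none ∧ a1 + a2 = y1) := by
          rintro ⟨h1, h2, h3⟩; exact hA ⟨h2, h1, h3⟩
        simp [hB, hne]

-- folding A's step from any accumulator is a join with the fold from []
theorem foldA_join (ys : List (Int × Int × Option Int)) :
    ∀ acc, List.foldl aStep acc ys = bJoin acc (List.foldl aStep [] ys) := by
  induction ys with
  | nil => intro acc; simp [bJoin_nil_right]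
  | cons y ys ih =>
    intro acc
    have h0 : aStep ([] : List (Int × Int × Option Int)) y = [y] := by simp [aStep]
    simp only [List.foldl_cons, h0]
    rw [ih (aStep acc y), ih [y], bJoin_aStep]

theorem bDC_eq_foldA : ∀ (n : Nat) (xs : List (Int × Int × Option Int)), xs.length ≤ n →
    bDC xs = List.foldl aStep [] xs := by
  intro n
  induction n with
  | zero =>
    intro xs hx
    rw [List.length_eq_zero_iff.mp (Nat.le_zero.mp hx)]
    simp [bDC]
  | succ n ih =>
    intro xs hx
    by_cases h1 : xs.length ≤ 1
    · rw [bDC, dif_pos h1]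
      match xs, h1 with
      | [], _ => rfl
      | [y], _ => simp [aStep]
    · rw [bDC, dif_neg h1]
      have htk : (xs.take (xs.length / 2)).length ≤ n := by
        simp; omega
      have hdr : (xs.drop (xs.length / 2)).length ≤ n := by
        simp; omega
      rw [ih _ htk, ih _ hdr, ← foldA_join]
      conv_rhs => rw [← List.take_append_drop (xs.length / 2) xs]
      rw [List.foldl_append]

-- ===== VERDICT (by name: the statement is the Claim_ definition above) =====
theorem merge_free_spec : Claim_equal_merge_free := by
  intro segments _
  unfold Spec_merge_free merge_free merge_free_alt
  exact (bDC_eq_foldA _ _ le_rfl).symm
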